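-- pv_equiv track=rewrite | github.com/pypi-data/pypi-mirror-313 | packages/nonebot-plugin-resolver2/nonebot_plugin_resolver2-1.3.4-py3-none-any.whl/nonebot_plugin_resolver2/matchers/weibo.py | mid2id
-- ===== SOURCE A (Python) =====
-- import os, re, asyncio, json, httpx, math
--
-- ALPHABET = '0123456789abcdefghijklmnopqrstuvwxyzABCDEFGHIJKLMNOPQRSTUVWXYZ'
--
-- def base62_encode(number):
--     """将数字转换为 base62 编码"""
--     if number == 0:
--         return '0'
--
--     result = ''
--     while number > 0:
--         result = ALPHABET[number % 62] + result
--         number //= 62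
--
--     return result
--
-- def mid2id(mid):
--     mid = str(mid)[::-1]  # 反转输入字符串
--     size = math.ceil(len(mid) / 7)  # 计算每个块的大小
--     result = []
--
--     for i in range(size):
--         # 对每个块进行处理并反转
--         s = mid[i * 7:(i + 1) * 7][::-1]
--         # 将字符串转为整数后进行 base62 编码
--         s = base62_encode(int(s))
--         # 如果不是最后一个块并且长度不足4位，进行左侧补零操作
--         if i < size - 1 and len(s) < 4:
--             s = '0' * (4 - len(s)) + s
--         result.append(s)
--
--     result.reverse()  # 反转结果数组
--     return ''.join(result)  # 将结果数组连接成字符串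
-- ===== SOURCE B (Python) =====
-- ALPHABET = '0123456789abcdefghijklmnopqrstuvwxyzABCDEFGHIJKLMNOPQRSTUVWXYZ'
--
-- def base62_encode(number):
--     """base62 as a recursion on the quotient"""
--     if number == 0:
--         return '0'
--     q, r = divmod(number, 62)
--     return (base62_encode(q) if q > 0 else '') + ALPHABET[r]
--
-- def mid2id(mid):
--     mid = str(mid)
--     if len(mid) <= 7:
--         return base62_encode(int(mid)) if mid else ''
--     # peel the last 7-digit block; encoding 62**4 + block and dropping the
--     # leading '1' zero-pads the block to exactly 4 base62 chars
--     return mid2id(mid[:-7]) + base62_encode(62 ** 4 + int(mid[-7:]))[1:]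
-- ===== Notes on version B (the rewrite author's own statement) =====
-- stated objective: simpler
-- what changed: B replaces A's reverse-the-string / index-computed chunk loop / re-reverse-each-chunk / reverse-the-result pipeline by a direct recursion that peels the last 7 digits off the string, and replaces A's conditional string padding by arithmetic: it encodes 62**4 + block and drops the first character, which zero-pads the block to width 4; the base62 helper is recursive instead of a prepend loop.
-- outside the precondition, e.g. on mid2id('5-123456'): A returns '50000', B returns '5tSM'; on mid2id('-5'): A returns '', B returns 'V'; on mid2id('x2345678'): A raises ValueError, B raises ValueError
import Mathlib
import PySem

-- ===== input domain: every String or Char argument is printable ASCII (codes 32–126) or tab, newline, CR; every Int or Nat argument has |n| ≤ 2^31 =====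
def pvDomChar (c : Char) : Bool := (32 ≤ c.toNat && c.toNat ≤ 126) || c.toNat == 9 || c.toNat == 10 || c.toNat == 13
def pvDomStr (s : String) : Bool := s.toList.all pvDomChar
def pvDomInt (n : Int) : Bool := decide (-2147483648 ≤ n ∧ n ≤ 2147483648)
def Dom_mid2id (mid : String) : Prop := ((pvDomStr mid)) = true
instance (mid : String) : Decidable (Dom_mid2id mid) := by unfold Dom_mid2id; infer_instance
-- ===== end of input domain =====

-- B replaces A's reverse/chunk-loop/re-reverse/reverse-again pipeline by a direct recursion
-- that peels the last 7-digit block, zero-padding arithmetically (encode 62^4 + block and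
-- drop the first character) instead of string-padding (objective: simpler; same O(n) cost).

-- ===== PORT A =====
def pvALPHABET : List Char := "0123456789abcdefghijklmnopqrstuvwxyzABCDEFGHIJKLMNOPQRSTUVWXYZ".toList

-- while number > 0: result = ALPHABET[number % 62] + result; number //= 62
-- (ALPHABET[number % 62]: 0 ≤ number % 62 < 62 always, so the .getD default is never used)
def pvB62LoopA (number : Int) (result : List Char) : List Char :=
  if h : 0 < number then
    pvB62LoopA (PySem.Int.floordiv number 62)
      ((PySem.List.pyGet? pvALPHABET (PySem.Int.mod number 62)).getD '0' :: result)
  else result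
termination_by number.toNat
decreasing_by
  rw [PySem.Int.floordiv_eq_ediv_of_pos (by norm_num : (0:Int) < 62)]
  omega

def pvBase62EncodeA (number : Int) : List Char :=
  if number = 0 then ['0'] else pvB62LoopA number []

def mid2id (mid : String) : String :=
  -- mid = str(mid)[::-1]
  let midr : List Char := (PySem.List.slice? mid.toList none none (-1)).getD []
  -- size = math.ceil(len(mid) / 7): exact integer ⌈n/7⌉ (the float ratio is exact at these sizes)
  let size : Nat := (midr.length + 6) / 7
  let result : List (List Char) :=
    (PySem.List.pyRange 0 (size : Int) 1).foldl (fun acc i =>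
      let s0 := PySem.List.slice midr (some (i * 7)) (some ((i + 1) * 7))
      let s1 := (PySem.List.slice? s0 none none (-1)).getD []
      -- int(s): Pre_mid2id excludes the ValueError (none) case, the default is never used there
      let s2 := pvBase62EncodeA ((PySem.Int.ofChars? s1).getD 0)
      let s3 := if i < (size : Int) - 1 ∧ s2.length < 4
                then List.replicate (4 - s2.length) '0' ++ s2 else s2
      acc ++ [s3]) []
  String.ofList (PySem.Chars.join [] result.reverse)

-- ===== PORT B =====
-- base62_encode: if number == 0: '0'; q, r = divmod(number, 62); recurse on q if q > 0, then ALPHABET[r]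
def pvB62Alt (number : Int) : List Char :=
  if number = 0 then ['0']
  else
    let q := PySem.Int.floordiv number 62
    let r := PySem.Int.mod number 62
    (if h : 0 < q then pvB62Alt q else []) ++ [(PySem.List.pyGet? pvALPHABET r).getD '0']
termination_by number.toNat
decreasing_by
  have h' : 0 < PySem.Int.floordiv number 62 := h
  rw [PySem.Int.floordiv_eq_ediv_of_pos (by norm_num : (0:Int) < 62)] at h' ⊢
  omega

def mid2id_alt (mid : String) : String :=
  let cs := mid.toList
  if _h : cs.length ≤ 7 then
    -- base62_encode(int(mid)) if mid else ''
    if cs ≠ [] then String.ofList (pvB62Alt ((PySem.Int.ofChars? cs).getD 0)) else ""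
  else
    -- mid2id(mid[:-7]) + base62_encode(62 ** 4 + int(mid[-7:]))[1:]
    let head := PySem.List.slice cs none (some (-7))
    let tail := PySem.List.slice cs (some (-7)) none
    String.ofList ((mid2id_alt (String.ofList head)).toList
      ++ PySem.List.slice (pvB62Alt (14776336 + (PySem.Int.ofChars? tail).getD 0)) (some 1) none)
termination_by mid.toList.length
decreasing_by
  have h2 : ¬ mid.toList.length ≤ 7 := _h
  rw [PySem.List.slice_to_neg_ofNat _ 7 (by norm_num)]
  simp only [String.toList_ofList, List.length_take]
  omega

-- ===== PRECONDITION & SPEC =====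
-- the k-th 7-char block of cs counted from the right (k = 0 is the last block; the
-- leftmost block is the 1–7 leading characters)
def pvChunk (cs : List Char) (k : Nat) : List Char :=
  (cs.take (cs.length - 7 * k)).drop (cs.length - 7 * k - 7)

-- Pre_: every 7-char block of mid parses as a Python int with a non-negative value
-- (< 62^4, which always holds for at most 7 decimal digits). This is the numeric-mid
-- domain: outside it A either raises ValueError from int() or, on blocks that parse
-- negative, pads the empty string its base62_encode returns for a negative number — an
-- accident of A's implementation that B's arithmetic padding has no reason to mimic.
def Pre_mid2id (mid : String) : Prop :=
  ∀ k ∈ List.range ((mid.toList.length + 6) / 7),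
    0 ≤ (PySem.Int.ofChars? (pvChunk mid.toList k)).getD (-1) ∧
    (PySem.Int.ofChars? (pvChunk mid.toList k)).getD (-1) < 14776336
instance (mid : String) : Decidable (Pre_mid2id mid) := by unfold Pre_mid2id; infer_instance
def pvWitness_mid2id : String := "12345678901234567890"

def Spec_mid2id (mid : String) (out : String) : Prop := out = mid2id_alt mid
instance (mid : String) (out : String) : Decidable (Spec_mid2id mid out) := by unfold Spec_mid2id; infer_instance

-- ===== CLAIM (what is proved, stated in full; the proofs are below) =====
def Claim_equal_mid2id : Prop := ∀ (mid : String), Dom_mid2id mid → Pre_mid2id mid → Spec_mid2id mid (mid2id mid)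

-- ===== LEMMAS AND PROOFS =====

-- A's chunk k (from the right), parsed and encoded with A's encoder
def pvEnc (cs : List Char) (k : Nat) : List Char :=
  pvBase62EncodeA ((PySem.Int.ofChars? (pvChunk cs k)).getD 0)

-- A's chunk list entry: chunk k encoded under A's padding rule
def pvPartA (cs : List Char) (k : Nat) : List Char :=
  if k < (cs.length + 6) / 7 - 1 ∧ (pvEnc cs k).length < 4
  then List.replicate (4 - (pvEnc cs k).length) '0' ++ pvEnc cs k else pvEnc cs k

theorem pv_join_nil_flatten (parts : List (List Char)) :
    PySem.Chars.join [] parts = parts.flatten := by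
  match parts with
  | [] => simp [PySem.Chars.join_nil]
  | [p] => simp [PySem.Chars.join_singleton]
  | p :: q :: rest =>
    rw [PySem.Chars.join_cons_cons, pv_join_nil_flatten (q :: rest)]
    simp

theorem pv_rev_take_rev {α : Type} (l : List α) (k : Nat) :
    (l.reverse.take k).reverse = l.drop (l.length - k) := by
  have hmin : min k l.reverse.length = l.length - (l.length - k) := by
    simp only [List.length_reverse]; omega
  rw [List.take_eq_take_min, hmin, ← List.reverse_drop, List.reverse_reverse]

theorem pv_rev_drop {α : Type} (l : List α) (a : Nat) (ha : a ≤ l.length) :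
    l.reverse.drop a = (l.take (l.length - a)).reverse := by
  rw [List.reverse_take]
  congr 1
  omega

-- the chunk mid[i*7:(i+1)*7][::-1] of the reversed string is a block of the original string
theorem pv_chunk_eq (cs : List Char) (a : Nat) (ha : a ≤ cs.length) :
    ((cs.reverse.drop a).take 7).reverse
      = (cs.take (cs.length - a)).drop (cs.length - a - 7) := by
  rw [pv_rev_drop cs a ha, pv_rev_take_rev, List.length_take]
  congr 1
  omega

theorem pv_pad_eq (s : List Char) :
    (if s.length < 4 then List.replicate (4 - s.length) '0' ++ s else s)
      = List.replicate (4 - s.length) '0' ++ s := by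
  split
  · rfl
  · rename_i h
    rw [show 4 - s.length = 0 by omega]
    simp

-- A = join of the reversed chunk-part list (holds for every input string)
theorem pv_A_charac (cs : List Char) :
    mid2id (String.ofList cs)
      = String.ofList (PySem.Chars.join []
          (((List.range ((cs.length + 6) / 7)).map (pvPartA cs)).reverse)) := by
  unfold mid2id
  simp only [String.toList_ofList, PySem.List.slice?_none_none_neg_one, Option.getD_some,
    List.length_reverse]
  rw [PySem.List.pyRange_zero_natCast, List.foldl_map,
    PySem.List.foldl_append_singleton_eq_map, List.nil_append]
  congr 3
  apply List.map_congr_left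
  intro j hj
  have hjs : j < (cs.length + 6) / 7 := List.mem_range.mp hj
  have h7j : 7 * j ≤ cs.length := by omega
  have e1 : ((j : Int) * 7) = ((7 * j : Nat) : Int) := by push_cast; ring
  have e2 : ((j : Int) + 1) * 7 = ((7 * j : Nat) : Int) + ((7 : Nat) : Int) := by push_cast; ring
  rw [e1, e2, PySem.List.slice_natCast_add]
  rw [pv_chunk_eq cs (7 * j) h7j]
  unfold pvPartA pvEnc pvChunk
  exact if_congr (by constructor <;> (intro hc; exact ⟨by omega, hc.2⟩)) rfl rfl

-- pvB62Alt on small values and one unfolding step on large ones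
theorem pv_alt_zero : pvB62Alt 0 = ['0'] := by rw [pvB62Alt]; simp

theorem pv_alt_small (v : Int) (h0 : 0 < v) (h62 : v < 62) :
    pvB62Alt v = [(PySem.List.pyGet? pvALPHABET v).getD '0'] := by
  rw [pvB62Alt, if_neg (by omega)]
  have hq : PySem.Int.floordiv v 62 = 0 := by
    rw [PySem.Int.floordiv_eq_ediv_of_pos (by norm_num : (0:Int) < 62)]; omega
  have hr : PySem.Int.mod v 62 = v := by
    rw [PySem.Int.mod_eq_emod_of_pos (by norm_num : (0:Int) < 62)]; omega
  simp only [hq, hr]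
  norm_num

theorem pv_alt_one : pvB62Alt 1 = ['1'] := by
  rw [pv_alt_small 1 (by norm_num) (by norm_num)]
  decide

theorem pv_alt_big (v : Int) (h : 62 ≤ v) :
    pvB62Alt v = pvB62Alt (v / 62) ++ [(PySem.List.pyGet? pvALPHABET (v % 62)).getD '0'] := by
  rw [pvB62Alt, if_neg (by omega)]
  have hq : PySem.Int.floordiv v 62 = v / 62 :=
    PySem.Int.floordiv_eq_ediv_of_pos (by norm_num : (0:Int) < 62)
  have hr : PySem.Int.mod v 62 = v % 62 :=
    PySem.Int.mod_eq_emod_of_pos (by norm_num : (0:Int) < 62)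
  simp only [hq, hr]
  rw [dif_pos (by omega : 0 < v / 62)]

-- the two encoders agree on non-negative numbers
theorem pv_loopA_alt (n : Int) (res : List Char) (h : 0 < n) :
    pvB62LoopA n res = pvB62Alt n ++ res := by
  rw [pvB62LoopA, dif_pos h, pvB62Alt, if_neg (by omega)]
  simp only []
  by_cases hq : 0 < PySem.Int.floordiv n 62
  · have hlt : (PySem.Int.floordiv n 62).toNat < n.toNat := by
      rw [PySem.Int.floordiv_eq_ediv_of_pos (by norm_num : (0:Int) < 62)]
      omega
    rw [pv_loopA_alt _ _ hq, dif_pos hq]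
    simp
  · rw [pvB62LoopA, dif_neg hq, dif_neg hq]
    simp
termination_by n.toNat
decreasing_by
  exact hlt

theorem pv_enc_eq (n : Int) (h : 0 ≤ n) : pvBase62EncodeA n = pvB62Alt n := by
  rcases eq_or_lt_of_le h with h0 | h0
  · rw [← h0, pv_alt_zero]
    unfold pvBase62EncodeA
    simp
  · unfold pvBase62EncodeA
    rw [if_neg (by omega), pv_loopA_alt n [] h0]
    simp

theorem pv_rep_shift (m : Nat) (c : Char) (l : List Char) :
    List.replicate m c ++ (c :: l) = c :: (List.replicate m c ++ l) := by
  induction m with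
  | zero => rfl
  | succ m ihm => simp [List.replicate_succ, ihm]

-- arithmetic zero-padding: encoding 62^k + v starts with '1' followed by v's base62
-- digits left-padded with '0' to width k
theorem pv_offset_pad (k : Nat) (v : Int) (hk : 1 ≤ k) (h0 : 0 ≤ v) (hv : v < (62:Int) ^ k) :
    pvB62Alt ((62:Int) ^ k + v)
      = '1' :: (List.replicate (k - (pvB62Alt v).length) '0' ++ pvB62Alt v) := by
  induction k generalizing v with
  | zero => omega
  | succ k ih =>
    by_cases hk0 : k = 0
    · subst hk0
      simp only [zero_add, pow_one] at hv ⊢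
      have hbig : (62:Int) ≤ 62 + v := by omega
      rw [pv_alt_big _ hbig]
      have hq : (62 + v) / 62 = 1 := by omega
      have hr : (62 + v) % 62 = v := by omega
      rw [hq, hr]
      rcases eq_or_lt_of_le h0 with hv0 | hv0
      · rw [← hv0, pv_alt_zero, pv_alt_one]
        decide
      · rw [pv_alt_small v hv0 hv, pv_alt_one]
        simp
    · have hk1 : 1 ≤ k := by omega
      have hp : (0:Int) < 62 ^ k := by positivity
      have hbig : (62:Int) ≤ 62 ^ (k+1) + v := by
        have : (62:Int) ≤ 62 ^ (k+1) := by
          calc (62:Int) = 62 ^ 1 := (pow_one _).symm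
          _ ≤ 62 ^ (k+1) := pow_le_pow_right₀ (by norm_num) (by omega)
        omega
      rw [pv_alt_big _ hbig]
      have hpow : (62:Int) ^ (k+1) = 62 ^ k * 62 := by ring
      have hq : ((62:Int) ^ (k+1) + v) / 62 = 62 ^ k + v / 62 := by
        rw [hpow]
        generalize (62:Int) ^ k = p
        omega
      have hr : ((62:Int) ^ (k+1) + v) % 62 = v % 62 := by
        rw [hpow]
        generalize (62:Int) ^ k = p
        omega
      have hv' : v / 62 < (62:Int) ^ k := by
        rw [Int.ediv_lt_iff_lt_mul (by norm_num : (0:Int) < 62)]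
        calc v < (62:Int) ^ (k+1) := hv
        _ = 62 ^ k * 62 := by ring
      rw [hq, hr, ih (v / 62) hk1 (Int.ediv_nonneg h0 (by norm_num)) hv']
      -- three shapes of v: 0, small, large
      rcases lt_trichotomy v 0 with hvc | hvc | hvc
      · omega
      · subst hvc
        have hd : (0:Int) / 62 = 0 := by omega
        have hm : (0:Int) % 62 = 0 := by omega
        rw [hd, hm, pv_alt_zero]
        have hc0 : (PySem.List.pyGet? pvALPHABET (0:Int)).getD '0' = '0' := by decide
        rw [hc0]
        obtain ⟨k', rfl⟩ : ∃ k', k = k' + 1 := ⟨k - 1, by omega⟩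
        simp only [List.replicate_succ, Nat.succ_sub_succ, List.cons_append,
          List.length_cons, List.length_nil, Nat.sub_zero]
        rw [show ('0' :: (List.replicate k' '0' ++ ['0']) : List Char)
              = List.replicate k' '0' ++ ['0', '0'] from (pv_rep_shift k' '0' ['0']).symm]
        simp
      · by_cases h62 : v < 62
        · have hq0 : v / 62 = 0 := by omega
          have hr0 : v % 62 = v := by omega
          rw [hq0, hr0, pv_alt_zero, pv_alt_small v hvc h62]
          obtain ⟨k', rfl⟩ : ∃ k', k = k' + 1 := ⟨k - 1, by omega⟩
          simp only [List.replicate_succ, Nat.succ_sub_succ, List.cons_append,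
            List.length_cons, List.length_nil, Nat.sub_zero]
          rw [pv_rep_shift]
          simp
        · rw [pv_alt_big v (by omega : 62 ≤ v)]
          simp [List.cons_append, List.append_assoc, Nat.add_sub_add_right]

-- head chunks are the tail chunks of the full string, shifted by one
theorem pv_chunk_head (cs : List Char) (h : 8 ≤ cs.length) (j : Nat) :
    pvChunk (cs.take (cs.length - 7)) j = pvChunk cs (j + 1) := by
  unfold pvChunk
  rw [List.length_take, List.take_take]
  rw [show min (min (cs.length - 7) cs.length - 7 * j) (cs.length - 7)
        = cs.length - 7 * (j + 1) by omega]
  rw [show min (cs.length - 7) cs.length - 7 * j - 7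
        = cs.length - 7 * (j + 1) - 7 by omega]

theorem pv_chunk_zero (cs : List Char) : pvChunk cs 0 = cs.drop (cs.length - 7) := by
  unfold pvChunk
  simp

-- main induction: B's right-peel recursion produces A's joined chunk list
theorem pv_main (n : Nat) : ∀ cs : List Char, cs.length ≤ n →
    (∀ k ∈ List.range ((cs.length + 6) / 7),
      0 ≤ (PySem.Int.ofChars? (pvChunk cs k)).getD (-1) ∧
      (PySem.Int.ofChars? (pvChunk cs k)).getD (-1) < 14776336) →
    mid2id_alt (String.ofList cs)
      = String.ofList (PySem.Chars.join []
          (((List.range ((cs.length + 6) / 7)).map (pvPartA cs)).reverse)) := by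
  induction n with
  | zero =>
    intro cs hlen _
    have : cs = [] := List.length_eq_zero_iff.mp (by omega)
    subst this
    rw [mid2id_alt]
    simp [PySem.Chars.join_nil]
  | succ n ih =>
    intro cs hlen hpre
    by_cases h7 : cs.length ≤ 7
    · -- single chunk
      by_cases hnil : cs = []
      · subst hnil
        rw [mid2id_alt]
        simp [PySem.Chars.join_nil]
      · have h1 : 1 ≤ cs.length := List.length_pos_iff.mpr hnil
        have hsz : (cs.length + 6) / 7 = 1 := by omega
        have hchunk : pvChunk cs 0 = cs := by
          unfold pvChunk
          rw [show cs.length - 7 * 0 = cs.length by omega, List.take_length,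
            show cs.length - 7 = 0 by omega, List.drop_zero]
        have hp := hpre 0 (by rw [List.mem_range]; omega)
        rw [hchunk] at hp
        obtain ⟨v, hv⟩ : ∃ v, PySem.Int.ofChars? cs = some v := by
          cases hov : PySem.Int.ofChars? cs
          · rw [hov] at hp; simp at hp
          · exact ⟨_, rfl⟩
        rw [hv] at hp
        simp only [Option.getD_some] at hp
        rw [mid2id_alt]
        simp only [String.toList_ofList]
        rw [dif_pos h7, if_pos hnil, hv]
        simp only [Option.getD_some]
        rw [hsz, List.range_one, List.map_cons, List.map_nil, List.reverse_singleton,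
          PySem.Chars.join_singleton]
        unfold pvPartA
        rw [if_neg (by intro hc; omega)]
        unfold pvEnc
        rw [hchunk, hv]
        simp only [Option.getD_some]
        rw [pv_enc_eq v hp.1]
    · -- peel the last block
      have h8 : 8 ≤ cs.length := by omega
      have hszH : (cs.length - 7 + 6) / 7 = (cs.length + 6) / 7 - 1 := by omega
      have hsz2 : 2 ≤ (cs.length + 6) / 7 := by omega
      rw [mid2id_alt]
      simp only [String.toList_ofList]
      rw [dif_neg (by omega : ¬ cs.length ≤ 7)]
      rw [PySem.List.slice_to_neg_ofNat cs 7 (by norm_num),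
        PySem.List.slice_from_neg_ofNat cs 7 (by norm_num)]
      -- Pre for the head
      have hpreH : ∀ k ∈ List.range (((cs.take (cs.length - 7)).length + 6) / 7),
          0 ≤ (PySem.Int.ofChars? (pvChunk (cs.take (cs.length - 7)) k)).getD (-1) ∧
          (PySem.Int.ofChars? (pvChunk (cs.take (cs.length - 7)) k)).getD (-1) < 14776336 := by
        intro k hk
        rw [List.length_take, min_eq_left (by omega)] at hk
        rw [pv_chunk_head cs h8 k]
        exact hpre (k + 1) (by
          rw [List.mem_range] at hk ⊢
          omega)
      have hlenH : (cs.take (cs.length - 7)).length ≤ n := by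
        rw [List.length_take]
        omega
      rw [ih (cs.take (cs.length - 7)) hlenH hpreH, String.toList_ofList]
      -- the last-block value
      have hp0 := hpre 0 (by rw [List.mem_range]; omega)
      rw [pv_chunk_zero] at hp0
      obtain ⟨v, hv⟩ : ∃ v, PySem.Int.ofChars? (cs.drop (cs.length - 7)) = some v := by
        cases hov : PySem.Int.ofChars? (cs.drop (cs.length - 7))
        · rw [hov] at hp0; simp at hp0
        · exact ⟨_, rfl⟩
      rw [hv] at hp0
      simp only [Option.getD_some] at hp0
      rw [hv]
      simp only [Option.getD_some]
      -- RHS: split off chunk 0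
      have hszsplit : (cs.length + 6) / 7 = ((cs.length + 6) / 7 - 1) + 1 := by omega
      rw [hszsplit, List.range_succ_eq_map, List.map_cons, List.reverse_cons,
        List.map_map]
      have hmapeq : (List.range ((cs.length + 6) / 7 - 1)).map (pvPartA cs ∘ Nat.succ)
          = (List.range ((cs.length + 6) / 7 - 1)).map (pvPartA (cs.take (cs.length - 7))) := by
        apply List.map_congr_left
        intro j _
        simp only [Function.comp_apply, Nat.succ_eq_add_one]
        unfold pvPartA pvEnc
        rw [pv_chunk_head cs h8 j, List.length_take, min_eq_left (by omega), hszH]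
        simp only [show j + 1 < (cs.length + 6) / 7 - 1 ↔ j < (cs.length + 6) / 7 - 1 - 1
          from by constructor <;> (intro; omega)]
      rw [hmapeq]
      rw [pv_join_nil_flatten, pv_join_nil_flatten, List.flatten_append]
      have hszHeq : ((cs.take (cs.length - 7)).length + 6) / 7 = (cs.length + 6) / 7 - 1 := by
        rw [List.length_take, min_eq_left (by omega)]
        omega
      rw [hszHeq]
      refine congrArg _ (congrArg₂ (· ++ ·) ?_ ?_)
      · simp
      -- last part: arithmetic padding equals A's padding of chunk 0
      unfold pvPartA pvEnc
      rw [pv_chunk_zero, hv]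
      simp only [Option.getD_some]
      simp only [show 0 < (cs.length + 6) / 7 - 1 from by omega, true_and]
      rw [pv_pad_eq]
      rw [PySem.List.slice_from_one]
      rw [show (14776336 : Int) + v = (62:Int) ^ 4 + v by norm_num]
      rw [pv_offset_pad 4 v (by norm_num) hp0.1 (by norm_num; omega)]
      rw [pv_enc_eq v hp0.1]
      simp
-- ===== VERDICT (by name: the statement is the Claim_ definition above) =====
theorem mid2id_spec : Claim_equal_mid2id := by
  intro mid _ hpre
  unfold Spec_mid2id
  have h1 := pv_A_charac mid.toList
  have h2 := pv_main mid.toList.length mid.toList le_rfl hpre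
  rw [String.ofList_toList] at h1 h2
  rw [h1, h2]
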